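-- pv_equiv track=rewrite | github.com/thanujamaheepala/computerVision | noiceFiltering.py | getMeanFilteredArray
-- ===== SOURCE A (Python) =====
-- def getMeanFilteredArray(imageArray,filterArray,divider=1):
--     f=len(filterArray)
--     N = len(imageArray)
--     M = len(imageArray[0])
--     result_array = []
--     for x in range(N-(f-1)):
--         result_row = []
--         for y in range(M-(f-1)):
--             result = 0
--             for i in range(x,x+f):
--                 for j in range (y,y+f):
--                     result+= imageArray[i][j]*filterArray[i-x][j-y]
--             result_row.append(int(result/divider))
--         result_array.append(result_row)
--     return result_array
-- ===== SOURCE B (Python) =====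
-- def getMeanFilteredArray(imageArray, filterArray, divider=1):
--     # filter-stationary shift-and-add: accumulate one scaled shifted image slab per
--     # filter tap instead of gathering a full f x f window per output cell (a different
--     # decomposition of the same work)
--     f = len(filterArray)
--     N = len(imageArray)
--     M = len(imageArray[0])
--     H = N - f + 1
--     W = M - f + 1
--     acc = [[0] * W for _ in range(H)]
--     for di, frow in enumerate(filterArray):
--         for dj, w in enumerate(frow[:f]):
--             acc = [[a + w * v for a, v in zip(arow, imageArray[x + di][dj:dj + W])]
--                    for x, arow in enumerate(acc)]
--     return [[int(v / divider) for v in row] for row in acc]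
-- ===== Notes on version B (the rewrite author's own statement) =====
-- stated objective: alternative
-- what changed: A gathers a full f x f window per output cell with four nested index loops; B preallocates a zero accumulator and, per filter tap (di,dj), adds the scaled shifted image slab via zip over row slices (filter-stationary shift-and-add), dividing once at the end.
import Mathlib
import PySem

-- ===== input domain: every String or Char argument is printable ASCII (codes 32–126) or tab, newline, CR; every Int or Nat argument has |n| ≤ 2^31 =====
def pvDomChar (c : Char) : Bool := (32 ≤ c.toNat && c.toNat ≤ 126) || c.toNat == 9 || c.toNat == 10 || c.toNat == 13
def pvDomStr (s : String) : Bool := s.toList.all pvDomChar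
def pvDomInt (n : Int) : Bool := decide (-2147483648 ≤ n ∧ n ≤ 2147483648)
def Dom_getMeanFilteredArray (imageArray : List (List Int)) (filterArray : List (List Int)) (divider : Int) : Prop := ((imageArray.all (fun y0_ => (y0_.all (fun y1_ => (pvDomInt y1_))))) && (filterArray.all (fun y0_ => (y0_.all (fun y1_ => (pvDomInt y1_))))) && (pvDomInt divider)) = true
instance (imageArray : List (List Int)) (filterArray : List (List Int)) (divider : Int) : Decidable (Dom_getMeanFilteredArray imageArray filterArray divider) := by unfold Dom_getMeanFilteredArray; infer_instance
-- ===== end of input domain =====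

-- B re-implements the per-window gather as filter-stationary shift-and-add (one scaled
-- shifted image slab accumulated per filter tap): a different decomposition of the same
-- O(H*W*f^2) work, not claimed faster.

-- shared 2-D indexing helper: m[i][j]; exact for the in-range nonnegative indices the
-- ports use on inputs satisfying Pre_ (Python raises out of range, pyGetD defaults).
def pvGet2 (m : List (List Int)) (i j : Int) : Int :=
  PySem.List.pyGetD (PySem.List.pyGetD m i []) j 0

-- ===== PORT A =====
-- literal transliteration; imageArray[0] is pyGetD imageArray 0 [] (Pre_ excludes the
-- empty image, where Python raises IndexError), int(result/divider) is truncdiv (exact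
-- under Pre_'s magnitude bound).
def getMeanFilteredArray (imageArray : List (List Int)) (filterArray : List (List Int)) (divider : Int) : List (List Int) :=
  let f : Int := filterArray.length
  let N : Int := imageArray.length
  let M : Int := (PySem.List.pyGetD imageArray 0 []).length
  (PySem.List.pyRange 0 (N - (f-1))).foldl (fun result_array x =>
    result_array ++ [
      (PySem.List.pyRange 0 (M - (f-1))).foldl (fun result_row y =>
        result_row ++ [
          PySem.Int.truncdiv
            ((PySem.List.pyRange x (x+f)).foldl (fun result i =>
              (PySem.List.pyRange y (y+f)).foldl (fun result j =>
                result + pvGet2 imageArray i j * pvGet2 filterArray (i-x) (j-y)) result) 0)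
            divider ]) [] ]) []

-- ===== PORT B =====
-- transliteration of Source B: zero accumulator, one fold per filter tap adding the scaled
-- shifted image slab (zip with a row slice), final map divides.
def getMeanFilteredArray_alt (imageArray : List (List Int)) (filterArray : List (List Int)) (divider : Int) : List (List Int) :=
  let f : Int := filterArray.length
  let N : Int := imageArray.length
  let M : Int := (PySem.List.pyGetD imageArray 0 []).length
  let H : Int := N - f + 1
  let W : Int := M - f + 1
  let acc0 : List (List Int) := List.replicate H.toNat (List.replicate W.toNat 0)
  let acc := (PySem.List.enumerate filterArray).foldl (fun acc p =>
      (PySem.List.enumerate (PySem.List.slice p.2 none (some f))).foldl (fun acc q =>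
        (PySem.List.enumerate acc).map (fun r =>
          (r.2.zip (PySem.List.slice (PySem.List.pyGetD imageArray (r.1 + p.1) [])
              (some q.1) (some (q.1 + W)))).map
            (fun s => s.1 + q.2 * s.2))) acc) acc0
  acc.map (fun row => row.map (fun v => PySem.Int.truncdiv v divider))

-- ===== PRECONDITION & SPEC =====
def pvMaxAbs (m : List (List Int)) : Nat :=
  (m.map (fun r => (r.map Int.natAbs).foldr max 0)).foldr max 0

-- Pre_ excludes: the empty image (IndexError), ragged rows / short filter rows that the
-- window indexing would hit (IndexError), divider = 0 when a division happens
-- (ZeroDivisionError), and — the one case where A still returns — inputs whose window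
-- sums can leave the 2^53 range in which int(result/divider), a binary64 float
-- truncation, is exact integer truncated division (beyond it A's values carry float
-- rounding noise that exact integer arithmetic cannot reproduce).
def Pre_getMeanFilteredArray (imageArray : List (List Int)) (filterArray : List (List Int)) (divider : Int) : Prop :=
  imageArray ≠ [] ∧
  ((1 ≤ filterArray.length ∧ filterArray.length ≤ imageArray.length ∧
      filterArray.length ≤ imageArray.headI.length) →
    ((∀ row ∈ imageArray, imageArray.headI.length ≤ row.length) ∧
     (∀ frow ∈ filterArray, filterArray.length ≤ frow.length))) ∧
  ((filterArray = [] ∨ (filterArray.length ≤ imageArray.length ∧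
      filterArray.length ≤ imageArray.headI.length)) →
    (divider ≠ 0 ∧
     filterArray.length * filterArray.length * pvMaxAbs imageArray * pvMaxAbs filterArray < 2^53))

instance (imageArray : List (List Int)) (filterArray : List (List Int)) (divider : Int) : Decidable (Pre_getMeanFilteredArray imageArray filterArray divider) := by
  unfold Pre_getMeanFilteredArray; infer_instance

def pvWitness_getMeanFilteredArray : List (List Int) × List (List Int) × Int :=
  ([[1, 2], [3, 4]], [[1]], 1)

def Spec_getMeanFilteredArray (imageArray : List (List Int)) (filterArray : List (List Int)) (divider : Int) (out : List (List Int)) : Prop := out = getMeanFilteredArray_alt imageArray filterArray divider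
instance (imageArray : List (List Int)) (filterArray : List (List Int)) (divider : Int) (out : List (List Int)) : Decidable (Spec_getMeanFilteredArray imageArray filterArray divider out) := by unfold Spec_getMeanFilteredArray; infer_instance

-- ===== CLAIM (what is proved, stated in full; the proofs are below) =====
def Claim_equal_getMeanFilteredArray : Prop := ∀ (imageArray : List (List Int)) (filterArray : List (List Int)) (divider : Int), Dom_getMeanFilteredArray imageArray filterArray divider → Pre_getMeanFilteredArray imageArray filterArray divider → Spec_getMeanFilteredArray imageArray filterArray divider (getMeanFilteredArray imageArray filterArray divider)

-- ===== LEMMAS AND PROOFS =====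

def pvCell (img filt : List (List Int)) (f x y : Nat) : Int :=
  ((List.range f).map (fun (di : Nat) =>
    ((List.range f).map (fun (dj : Nat) =>
      pvGet2 img ((x : Int) + (di : Int)) ((y : Int) + (dj : Int)) *
        pvGet2 filt (di : Int) (dj : Int))).sum)).sum
def pvCommon (img filt : List (List Int)) (divider : Int) : List (List Int) :=
  let f : Int := filt.length
  let Hn : Nat := ((img.length : Int) - f + 1).toNat
  let Wn : Nat := (((PySem.List.pyGetD img 0 []).length : Int) - f + 1).toNat
  (List.range Hn).map (fun x => (List.range Wn).map (fun y =>
    PySem.Int.truncdiv (pvCell img filt filt.length x y) divider))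
lemma pv_pyRange_zero_toNat (t : Int) :
    PySem.List.pyRange 0 t = (List.range t.toNat).map Int.ofNat := by
  rw [PySem.List.pyRange_of_pos 0 t (by norm_num)]
  rcases lt_or_ge 0 t with h | h
  · simp [h]
  · have : t.toNat = 0 := Int.toNat_of_nonpos h
    simp [not_lt.mpr h, this]
lemma pv_pyRange_add_natCast (a : Int) (n : Nat) :
    PySem.List.pyRange a (a + n) = (List.range n).map (fun (k : Nat) => a + (k : Int)) := by
  rw [PySem.List.pyRange_of_pos a (a + n) (by norm_num)]
  rcases Nat.eq_zero_or_pos n with h | h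
  · simp [h]
  · have hlt : a < a + (n : Int) := by omega
    simp [hlt]

lemma pv_gather (img filt : List (List Int)) (fN : Nat) (x y : Nat) :
    (PySem.List.pyRange (x : Int) ((x : Int) + (fN : Int))).foldl (fun r i =>
      (PySem.List.pyRange (y : Int) ((y : Int) + (fN : Int))).foldl (fun r j =>
        r + pvGet2 img i j * pvGet2 filt (i - (x : Int)) (j - (y : Int))) r) 0
    = pvCell img filt fN x y := by
  simp only [pv_pyRange_add_natCast, List.foldl_map, PySem.List.foldl_add, pvCell,
    add_sub_cancel_left, zero_add]

lemma pv_A_eq_common (img filt : List (List Int)) (d : Int) :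
    getMeanFilteredArray img filt d = pvCommon img filt d := by
  unfold getMeanFilteredArray pvCommon
  have hb : (img.length : Int) - ((filt.length : Int) - 1)
      = (img.length : Int) - (filt.length : Int) + 1 := by ring
  have hb2 : ((PySem.List.pyGetD img 0 []).length : Int) - ((filt.length : Int) - 1)
      = ((PySem.List.pyGetD img 0 []).length : Int) - (filt.length : Int) + 1 := by ring
  simp only [PySem.List.foldl_append_singleton_eq_map, List.nil_append, hb, hb2,
    pv_pyRange_zero_toNat, List.map_map]
  refine List.map_congr_left ?_
  intro x hx
  simp only [Function.comp, Int.ofNat_eq_natCast]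
  refine List.map_congr_left ?_
  intro y hy
  simp only [Function.comp, Int.ofNat_eq_natCast]
  rw [pv_gather]

def pvTap (img : List (List Int)) (W : Int) (acc : List (List Int)) (t : Int × Int × Int) : List (List Int) :=
  (PySem.List.enumerate acc).map (fun r =>
    (r.2.zip (PySem.List.slice (PySem.List.pyGetD img (r.1 + t.1) [])
        (some t.2.1) (some (t.2.1 + W)))).map
      (fun s => s.1 + t.2.2 * s.2))

lemma pv_B_flat (img : List (List Int)) (W fI : Int) (filt : List (List Int)) (acc0 : List (List Int)) :
    (PySem.List.enumerate filt).foldl (fun acc p =>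
      (PySem.List.enumerate (PySem.List.slice p.2 none (some fI))).foldl (fun acc q =>
        (PySem.List.enumerate acc).map (fun r =>
          (r.2.zip (PySem.List.slice (PySem.List.pyGetD img (r.1 + p.1) [])
              (some q.1) (some (q.1 + W)))).map
            (fun s => s.1 + q.2 * s.2))) acc) acc0
    = ((PySem.List.enumerate filt).flatMap (fun p =>
        (PySem.List.enumerate (PySem.List.slice p.2 none (some fI))).map (fun q => (p.1, q.1, q.2)))).foldl
        (pvTap img W) acc0 := by
  rw [List.foldl_flatMap]
  simp only [List.foldl_map]
  rfl

lemma pv_enumerate_rangeMap {α : Type} (d : α) (Hn : Nat) (h : Nat → α) :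
    PySem.List.enumerate ((List.range Hn).map h) = (List.range Hn).map (fun (x : Nat) => ((↑x : Int), h x)) := by
  rw [PySem.List.enumerate_eq_map_pyRange _ d]
  have hlen : PySem.List.len (List.map h (List.range Hn)) = (Hn : Int) := by
    simp [PySem.List.len]
  rw [hlen, pv_pyRange_zero_toNat]
  simp only [Int.toNat_natCast, List.map_map]
  refine List.map_congr_left ?_
  intro x hx
  have hxlt : x < Hn := List.mem_range.mp hx
  simp only [Function.comp, Int.ofNat_eq_natCast,
    PySem.List.pyGetD_natCast, PySem.List.getD_map_range h Hn x d hxlt]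

lemma pv_tap_zero (img : List (List Int)) (W : Int) (Hn : Nat) (t : Int × Int × Int) :
    pvTap img W ((List.range Hn).map (fun _ => ([] : List Int))) t
    = (List.range Hn).map (fun _ => ([] : List Int)) := by
  unfold pvTap
  rw [pv_enumerate_rangeMap []]
  simp [List.map_map, Function.comp_def]

lemma pv_tap_step (img : List (List Int)) (Hn Wn : Nat) (dn jn : Nat) (w : Int)
    (g : Nat → Nat → Int)
    (hlen : ∀ x : Nat, x < Hn → jn + Wn ≤ (PySem.List.pyGetD img ((x : Int) + (dn : Int)) []).length) :
    pvTap img (Wn : Int) ((List.range Hn).map (fun x => (List.range Wn).map (g x)))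
      ((dn : Int), (jn : Int), w)
    = (List.range Hn).map (fun x => (List.range Wn).map (fun y =>
        g x y + w * pvGet2 img ((x : Int) + (dn : Int)) ((y : Int) + (jn : Int)))) := by
  unfold pvTap
  rw [pv_enumerate_rangeMap []]
  rw [List.map_map]
  refine List.map_congr_left ?_
  intro x hx
  have hxlt : x < Hn := List.mem_range.mp hx
  simp only [Function.comp]
  have hsl : PySem.List.slice (PySem.List.pyGetD img ((x : Int) + (dn : Int)) [])
      (some (jn : Int)) (some ((jn : Int) + (Wn : Int)))
      = ((PySem.List.pyGetD img ((x : Int) + (dn : Int)) []).drop jn).take Wn :=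
    PySem.List.slice_natCast_add _ jn Wn
  rw [hsl]
  apply List.ext_getElem
  · have := hlen x hxlt
    simp [List.length_take, List.length_drop]
    omega
  · intro k hk1 hk2
    have hlx := hlen x hxlt
    have hklt : k < Wn := by
      simp [List.length_take, List.length_drop] at hk1
      omega
    simp only [List.getElem_map, List.getElem_zip, List.getElem_take, List.getElem_drop,
      List.getElem_range]
    have hc : ((k : Int) + (jn : Int)) = ((k + jn : Nat) : Int) := by push_cast; ring
    have hcm : k + jn = jn + k := Nat.add_comm _ _
    simp only [pvGet2, hc, PySem.List.pyGetD_natCast, hcm]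
    rw [List.getD_eq_getElem _ _ (by omega)]

lemma pv_taps_explicit (filt : List (List Int))
    (hf : ∀ frow ∈ filt, filt.length ≤ frow.length) :
    (PySem.List.enumerate filt).flatMap (fun p =>
      (PySem.List.enumerate (PySem.List.slice p.2 none (some (filt.length : Int)))).map
        (fun q => (p.1, q.1, q.2)))
    = ((List.range filt.length).flatMap (fun dn =>
        (List.range filt.length).map (fun jn => (dn, jn)))).map
        (fun u => ((u.1 : Int), (u.2 : Int), pvGet2 filt u.1 u.2)) := by
  rw [PySem.List.enumerate_eq_map_pyRange _ ([] : List Int)]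
  have hlf : PySem.List.len filt = (filt.length : Int) := by simp [PySem.List.len]
  rw [hlf, pv_pyRange_zero_toNat]
  simp only [Int.toNat_natCast, List.map_map, List.flatMap_map, List.map_flatMap,
    List.map_map]
  refine List.flatMap_congr ?_
  intro dn hdn
  have hdlt : dn < filt.length := List.mem_range.mp hdn
  simp only [Function.comp, Int.ofNat_eq_natCast, PySem.List.pyGetD_natCast,
    PySem.List.slice_to_natCast]
  have hrow : filt.getD dn [] ∈ filt := by
    rw [List.getD_eq_getElem _ _ hdlt]; exact List.getElem_mem _
  have hrl : filt.length ≤ (filt.getD dn []).length := hf _ hrow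
  rw [PySem.List.enumerate_eq_map_pyRange _ (0 : Int)]
  have hlt : PySem.List.len ((filt.getD dn []).take filt.length) = (filt.length : Int) := by
    simp only [PySem.List.len, List.length_take]; omega
  rw [hlt, pv_pyRange_zero_toNat]
  simp only [Int.toNat_natCast, List.map_map]
  refine List.map_congr_left ?_
  intro jn hjn
  have hjlt : jn < filt.length := List.mem_range.mp hjn
  simp only [Function.comp, Int.ofNat_eq_natCast, PySem.List.pyGetD_natCast, pvGet2]
  rw [List.getD_eq_getElem _ _ (by simp only [List.length_take]; omega)]
  simp only [List.getElem_take]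
  rw [List.getD_eq_getElem _ _ (by omega : jn < (filt.getD dn []).length)]

lemma pv_fold_taps (img filt : List (List Int)) (Hn Wn : Nat) (taps : List (Nat × Nat))
    (hlen : ∀ u ∈ taps, ∀ x : Nat, x < Hn →
      u.2 + Wn ≤ (PySem.List.pyGetD img ((x : Int) + (u.1 : Int)) []).length)
    (g : Nat → Nat → Int) :
    taps.foldl (fun acc u =>
        pvTap img (Wn : Int) acc ((u.1 : Int), (u.2 : Int), pvGet2 filt u.1 u.2))
      ((List.range Hn).map (fun x => (List.range Wn).map (g x)))
    = (List.range Hn).map (fun x => (List.range Wn).map (fun y =>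
        g x y + (taps.map (fun u =>
          pvGet2 filt u.1 u.2 * pvGet2 img ((x : Int) + (u.1 : Int)) ((y : Int) + (u.2 : Int)))).sum)) := by
  induction taps generalizing g with
  | nil => simp
  | cons u rest ih =>
    rw [List.foldl_cons,
      pv_tap_step img Hn Wn u.1 u.2 (pvGet2 filt u.1 u.2) g
        (fun x hx => hlen u List.mem_cons_self x hx),
      ih (fun v hv => hlen v (List.mem_cons_of_mem _ hv)) _]
    simp [add_assoc]

lemma pv_fold_taps_zero (img : List (List Int)) (W : Int) (Hn : Nat)
    (taps : List (Int × Int × Int)) :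
    taps.foldl (pvTap img W) ((List.range Hn).map (fun _ => ([] : List Int)))
    = (List.range Hn).map (fun _ => ([] : List Int)) := by
  induction taps with
  | nil => rfl
  | cons t rest ih => rw [List.foldl_cons, pv_tap_zero, ih]

lemma pv_fold_taps_nil (img : List (List Int)) (W : Int) (taps : List (Int × Int × Int)) :
    taps.foldl (pvTap img W) [] = [] := by
  induction taps with
  | nil => rfl
  | cons t rest ih => rw [List.foldl_cons]; simpa [pvTap, PySem.List.enumerate] using ih

lemma pv_sum_taps (img filt : List (List Int)) (fN : Nat) (x y : Nat) :
    (((List.range fN).flatMap (fun dn => (List.range fN).map (fun jn => (dn, jn)))).map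
      (fun u : Nat × Nat =>
        pvGet2 filt u.1 u.2 * pvGet2 img ((x : Int) + (u.1 : Int)) ((y : Int) + (u.2 : Int)))).sum
    = pvCell img filt fN x y := by
  rw [List.map_flatMap, List.flatMap_def, List.sum_flatten, List.map_map]
  unfold pvCell
  refine congrArg List.sum ?_
  refine List.map_congr_left ?_
  intro dn _
  simp only [Function.comp, List.map_map]
  refine congrArg List.sum ?_
  refine List.map_congr_left ?_
  intro jn _
  exact mul_comm _ _

lemma pv_headI (img : List (List Int)) (hne : img ≠ []) :
    PySem.List.pyGetD img 0 [] = img.headI := by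
  cases img with
  | nil => exact absurd rfl hne
  | cons a l =>
    have : ((0 : Nat) : Int) = (0 : Int) := rfl
    rw [← this, PySem.List.pyGetD_natCast]
    rfl

lemma pv_B_eq_common (img filt : List (List Int)) (d : Int)
    (h : Pre_getMeanFilteredArray img filt d) :
    getMeanFilteredArray_alt img filt d = pvCommon img filt d := by
  obtain ⟨hne, hshape, -⟩ := h
  unfold getMeanFilteredArray_alt pvCommon
  simp only [pv_B_flat]
  by_cases hH : ((img.length : Int) - (filt.length : Int) + 1).toNat = 0
  · simp [hH, pv_fold_taps_nil]
  · by_cases hW : (((PySem.List.pyGetD img 0 []).length : Int) - (filt.length : Int) + 1).toNat = 0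
    · have hacc0 : List.replicate ((img.length : Int) - (filt.length : Int) + 1).toNat
          (List.replicate (((PySem.List.pyGetD img 0 []).length : Int) - (filt.length : Int) + 1).toNat (0 : Int))
          = (List.range ((img.length : Int) - (filt.length : Int) + 1).toNat).map
              (fun _ => ([] : List Int)) := by
        simp [hW]
      rw [hacc0, pv_fold_taps_zero]
      simp [hW]
    · -- both Hn and Wn positive
      have hM : PySem.List.pyGetD img 0 [] = img.headI := pv_headI img hne
      have hMW := hW
      rw [hM] at hMW
      have hf : ∀ frow ∈ filt, filt.length ≤ frow.length := by
        rcases Nat.eq_zero_or_pos filt.length with h0 | h1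
        · intro frow hfrow
          rw [List.length_eq_zero_iff.mp h0] at hfrow
          cases hfrow
        · exact (hshape ⟨h1, by omega, by omega⟩).2
      have hlen : ∀ u ∈ ((List.range filt.length).flatMap (fun dn =>
            (List.range filt.length).map (fun jn => (dn, jn)))),
          ∀ x : Nat, x < ((img.length : Int) - (filt.length : Int) + 1).toNat →
          u.2 + (((PySem.List.pyGetD img 0 []).length : Int) - (filt.length : Int) + 1).toNat
            ≤ (PySem.List.pyGetD img ((x : Int) + (u.1 : Int)) []).length := by
        intro u hu x hx
        rw [List.mem_flatMap] at hu
        obtain ⟨dn, hdn, hu2⟩ := hu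
        rw [List.mem_map] at hu2
        obtain ⟨jn, hjn, rfl⟩ := hu2
        have hdlt : dn < filt.length := List.mem_range.mp hdn
        have hjlt : jn < filt.length := List.mem_range.mp hjn
        have h1f : 1 ≤ filt.length := by omega
        have hrect : ∀ row ∈ img, img.headI.length ≤ row.length :=
          (hshape ⟨h1f, by omega, by omega⟩).1
        have hcast : ((x : Int) + (dn : Int)) = ((x + dn : Nat) : Int) := by push_cast; ring
        rw [hcast, PySem.List.pyGetD_natCast]
        have hin : x + dn < img.length := by omega
        rw [List.getD_eq_getElem _ _ hin]
        have hmem : img[x + dn] ∈ img := List.getElem_mem _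
        have := hrect _ hmem
        rw [hM]
        omega
      rw [pv_taps_explicit filt hf, List.foldl_map]
      have hWeq : (((PySem.List.pyGetD img 0 []).length : Int) - (filt.length : Int) + 1)
          = (((((PySem.List.pyGetD img 0 []).length : Int) - (filt.length : Int) + 1).toNat : Nat) : Int) := by
        omega
      rw [hWeq]
      simp only [Int.toNat_natCast]
      have hacc0 : List.replicate ((img.length : Int) - (filt.length : Int) + 1).toNat
          (List.replicate (((PySem.List.pyGetD img 0 []).length : Int) - (filt.length : Int) + 1).toNat (0 : Int))
          = (List.range ((img.length : Int) - (filt.length : Int) + 1).toNat).map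
              (fun _ => (List.range (((PySem.List.pyGetD img 0 []).length : Int) - (filt.length : Int) + 1).toNat).map
                (fun _ => (0 : Int))) := by
        simp
      rw [hacc0]
      rw [pv_fold_taps img filt _ _ _ hlen (fun _ _ => 0)]
      simp only [List.map_map]
      refine List.map_congr_left ?_
      intro x _
      simp only [Function.comp, List.map_map]
      refine List.map_congr_left ?_
      intro y _
      simp only [Function.comp]
      rw [zero_add, pv_sum_taps]

-- ===== VERDICT (by name: the statement is the Claim_ definition above) =====
theorem getMeanFilteredArray_spec : Claim_equal_getMeanFilteredArray := by
  intro imageArray filterArray divider _ hpre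
  unfold Spec_getMeanFilteredArray
  rw [pv_A_eq_common, pv_B_eq_common imageArray filterArray divider hpre]
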